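-- pv_equiv track=rewrite | github.com/hamzagorgulu/AlarmPrediction | helpers.py | sequence_segmentation
-- ===== SOURCE A (Python) =====
-- def sequence_segmentation(alarm_dict_list, time_delta):
--     """
--     This function segments the alarm sequence according to the time_delta.
--     alarm_dict_list: list of dictionaries
--     time_delta: time delta in seconds
--     Returns: list of lists (alarms seperated by time_delta)
--     """
--     alarm_sequence = []
--     for i in range(len(alarm_dict_list)):
--         if i == 0:
--             alarm_sequence.append([alarm_dict_list[i]])
--         else:
--             if alarm_dict_list[i]["TimeDelta"] < time_delta: # add this alarm into a new segment
--                 alarm_sequence[-1].append(alarm_dict_list[i])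
--             else:
--                 alarm_sequence.append([alarm_dict_list[i]])
--     return alarm_sequence
-- ===== SOURCE B (Python) =====
-- def sequence_segmentation(alarm_dict_list, time_delta):
--     """Two-pointer re-implementation: find each segment's end index, then slice."""
--     segments = []
--     i, n = 0, len(alarm_dict_list)
--     while i < n:
--         j = i + 1
--         while j < n and alarm_dict_list[j]["TimeDelta"] < time_delta:
--             j += 1
--         segments.append(alarm_dict_list[i:j])
--         i = j
--     return segments
-- ===== Notes on version B (the rewrite author's own statement) =====
-- stated objective: alternative
-- what changed: Replaces A's grow-the-last-segment loop (appending into alarm_sequence[-1]) with a two-pointer scan that finds each segment's end index and emits the slice alarm_dict_list[i:j] in one step.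
import Mathlib
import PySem

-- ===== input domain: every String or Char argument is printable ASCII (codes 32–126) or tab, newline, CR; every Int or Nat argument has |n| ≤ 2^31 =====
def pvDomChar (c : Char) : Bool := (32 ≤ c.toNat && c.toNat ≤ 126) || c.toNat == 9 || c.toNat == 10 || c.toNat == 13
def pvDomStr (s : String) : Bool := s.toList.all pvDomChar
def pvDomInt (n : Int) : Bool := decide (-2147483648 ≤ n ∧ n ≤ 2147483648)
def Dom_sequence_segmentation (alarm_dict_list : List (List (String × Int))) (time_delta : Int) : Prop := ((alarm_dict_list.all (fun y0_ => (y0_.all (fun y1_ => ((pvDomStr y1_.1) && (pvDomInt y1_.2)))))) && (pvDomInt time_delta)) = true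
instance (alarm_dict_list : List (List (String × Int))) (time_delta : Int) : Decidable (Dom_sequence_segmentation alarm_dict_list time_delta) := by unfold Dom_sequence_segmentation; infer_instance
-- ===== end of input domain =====

-- B replaces A's grow-the-last-segment loop with a two-pointer scan emitting each segment as one slice (alternative decomposition, same cost).

-- ===== PORT A =====
-- d["TimeDelta"] : first-match lookup in the association list (getD 0 is never reached under Pre_)
def pvGetTD (d : List (String × Int)) : Int := (d.lookup "TimeDelta").getD 0

def sequence_segmentation (alarm_dict_list : List (List (String × Int))) (time_delta : Int) : List (List (List (String × Int))) :=
  (PySem.List.pyRange 0 alarm_dict_list.length 1).foldl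
    (fun acc i =>
      if i = 0 then
        acc ++ [[PySem.List.pyGetD alarm_dict_list i []]]
      else if pvGetTD (PySem.List.pyGetD alarm_dict_list i []) < time_delta then
        acc.dropLast ++ [(acc.getLast?.getD []) ++ [PySem.List.pyGetD alarm_dict_list i []]]
      else
        acc ++ [[PySem.List.pyGetD alarm_dict_list i []]])
    []

-- ===== PORT B =====
-- two-pointer scan: the inner while over j is the takeWhile/dropWhile split of the part after the segment head
def sequence_segmentation_alt (alarm_dict_list : List (List (String × Int))) (time_delta : Int) : List (List (List (String × Int))) :=
  match alarm_dict_list with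
  | [] => []
  | x :: rest =>
      (x :: rest.takeWhile (fun d => pvGetTD d < time_delta)) ::
        sequence_segmentation_alt (rest.dropWhile (fun d => pvGetTD d < time_delta)) time_delta
termination_by alarm_dict_list.length
decreasing_by
  simp only [List.length_cons]
  exact Nat.lt_succ_of_le (List.length_dropWhile_le _ _)

-- ===== PRECONDITION & SPEC =====
-- Pre_ excludes exactly the inputs where Python A raises KeyError: an element after the first with no "TimeDelta" key.
def Pre_sequence_segmentation (alarm_dict_list : List (List (String × Int))) (time_delta : Int) : Prop :=
  ∀ d ∈ alarm_dict_list.drop 1, (d.lookup "TimeDelta").isSome = true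
instance (alarm_dict_list : List (List (String × Int))) (time_delta : Int) : Decidable (Pre_sequence_segmentation alarm_dict_list time_delta) := by unfold Pre_sequence_segmentation; infer_instance

def pvWitness_sequence_segmentation : (List (List (String × Int))) × Int :=
  ([[("Name", 1)], [("TimeDelta", 5)], [("TimeDelta", 1)]], 3)

def Spec_sequence_segmentation (alarm_dict_list : List (List (String × Int))) (time_delta : Int) (out : List (List (List (String × Int)))) : Prop := out = sequence_segmentation_alt alarm_dict_list time_delta
instance (alarm_dict_list : List (List (String × Int))) (time_delta : Int) (out : List (List (List (String × Int)))) : Decidable (Spec_sequence_segmentation alarm_dict_list time_delta out) := by unfold Spec_sequence_segmentation; infer_instance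

-- ===== CLAIM (what is proved, stated in full; the proofs are below) =====
def Claim_equal_sequence_segmentation : Prop := ∀ (alarm_dict_list : List (List (String × Int))) (time_delta : Int), Dom_sequence_segmentation alarm_dict_list time_delta → Pre_sequence_segmentation alarm_dict_list time_delta → Spec_sequence_segmentation alarm_dict_list time_delta (sequence_segmentation alarm_dict_list time_delta)

-- ===== LEMMAS AND PROOFS =====

-- A's loop body for indices ≥ 1, as a function of the looked-up element
def pvStep (time_delta : Int) (acc : List (List (List (String × Int)))) (d : List (String × Int)) : List (List (List (String × Int))) :=
  if pvGetTD d < time_delta then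
    acc.dropLast ++ [(acc.getLast?.getD []) ++ [d]]
  else
    acc ++ [[d]]

-- Invariant of A's loop: folding pvStep over the remaining elements, starting from a
-- state whose last segment is `cur`, produces `cur` extended by the current run, then B's segments.
theorem pvStep_foldl (time_delta : Int) :
    ∀ (rest : List (List (String × Int))) (acc : List (List (List (String × Int)))) (cur : List (List (String × Int))),
      rest.foldl (pvStep time_delta) (acc ++ [cur]) =
        acc ++ (cur ++ rest.takeWhile (fun d => pvGetTD d < time_delta)) ::
          sequence_segmentation_alt (rest.dropWhile (fun d => pvGetTD d < time_delta)) time_delta := by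
  intro rest
  induction rest with
  | nil => intro acc cur; simp [sequence_segmentation_alt]
  | cons d rest' ih =>
      intro acc cur
      by_cases h : pvGetTD d < time_delta
      · have hstep : pvStep time_delta (acc ++ [cur]) d = acc ++ [cur ++ [d]] := by
          simp [pvStep, h]
        simp only [List.foldl_cons, hstep, ih, List.takeWhile_cons, List.dropWhile_cons, h]
        simp
      · have hstep : pvStep time_delta (acc ++ [cur]) d = (acc ++ [cur]) ++ [[d]] := by
          simp [pvStep, h]
        simp only [List.foldl_cons, hstep, ih, List.takeWhile_cons, List.dropWhile_cons, h]
        simp [sequence_segmentation_alt]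

theorem sequence_segmentation_eq_alt (l : List (List (String × Int))) (time_delta : Int) :
    sequence_segmentation l time_delta = sequence_segmentation_alt l time_delta := by
  cases l with
  | nil => simp [sequence_segmentation, sequence_segmentation_alt, PySem.List.pyRange]
  | cons x rest =>
      unfold sequence_segmentation
      rw [PySem.List.pyRange_one_cons (by simp)]
      simp only [List.foldl_cons]
      norm_num [PySem.List.pyGetD_zero_cons]
      rw [show ((rest.length : Int) + 1) = ((x :: rest).length : Int) by simp]
      have hcongr : (PySem.List.pyRange 1 ((x :: rest).length : Int) 1).foldl
          (fun acc i =>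
            if i = 0 then acc ++ [[PySem.List.pyGetD (x :: rest) i []]]
            else if pvGetTD (PySem.List.pyGetD (x :: rest) i []) < time_delta then
              acc.dropLast ++ [(acc.getLast?.getD []) ++ [PySem.List.pyGetD (x :: rest) i []]]
            else acc ++ [[PySem.List.pyGetD (x :: rest) i []]]) [[x]]
          = (PySem.List.pyRange 1 ((x :: rest).length : Int) 1).foldl
            (fun acc i => pvStep time_delta acc (PySem.List.pyGetD (x :: rest) i [])) [[x]] := by
        apply PySem.List.foldl_congr_mem
        intro acc i hi
        have h1 : 1 ≤ i := (PySem.List.mem_pyRange_one.mp hi).1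
        have : ¬ i = 0 := by omega
        simp [this, pvStep]
      rw [hcongr, PySem.List.foldl_pyRange_pyGetD' (x :: rest) [] (pvStep time_delta) [[x]] (by omega)]
      simp only [Int.toNat_one, List.drop_one, List.tail_cons]
      have := pvStep_foldl time_delta rest [] [x]
      simp only [List.nil_append] at this
      rw [this]
      simp [sequence_segmentation_alt]

-- ===== VERDICT (by name: the statement is the Claim_ definition above) =====
theorem sequence_segmentation_spec : Claim_equal_sequence_segmentation := by
  intro l td _ _
  unfold Spec_sequence_segmentation
  exact sequence_segmentation_eq_alt l td
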